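-- pv_equiv track=rewrite | github.com/gsitechorg/open-belex-tests | tests/test_belex_dimas_preamble.py | dima_preamble
-- ===== SOURCE A (Python) =====
-- int2vec = lambda x : [(x >> i) & 0x1 for i in range(16)]
--
-- vec2int = lambda v : sum([x*(2**i) for i,x in enumerate(v)])
--
-- def dima_preamble(x,y):
--
--     cout1 = int2vec(x ^ y)
--     cout0 = int2vec(x & y)
--
--     x = int2vec(x)
--     y = int2vec(y)
--
--     for i in range(1,4):
--         for j in range(i,16,4):
--             cout1[j] = cout1[j-1] & (x[j] ^ y[j])
--             cout0[j] = x[j] & y[j] | (cout0[j-1] & (x[j] ^ y[j]))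
--
--     cout1 = vec2int(cout1) #x ^ y ^ cout0
--     cout0 = vec2int(cout0)
--
--     x = vec2int(x)
--     y = vec2int(y)
--
--     res = cout0 | cout1
--
--     return res
-- ===== SOURCE B (Python) =====
-- def dima_preamble(x, y):
--     # Each 4-bit group's output bit j is the carry out of bit j when adding the
--     # two nibbles with carry-in 1; read all four carries at once from
--     # ((a + b + 1) ^ a ^ b) >> 1 instead of running the bitwise chain.
--     res = 0
--     for base in (0, 4, 8, 12):
--         a = (x >> base) & 15
--         b = (y >> base) & 15
--         res += ((((a + b + 1) ^ a ^ b) >> 1) & 15) * 2 ** base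
--     return res
-- ===== Notes on version B (the rewrite author's own statement) =====
-- stated objective: alternative
-- what changed: A builds 16-entry bit-vector lists with int2vec, runs three stride-4 bitwise chain-update passes (c1 propagate chain, c0 generate chain) over them and converts back with vec2int before or-ing; B contains no bitwise chain at all: per 4-bit group it extracts the two nibbles a and b and reads all four output bits at once as the carry bits of the integer addition a+b+1, via ((a+b+1)^a^b)>>1, accumulating each group's value into the result.
import Mathlib
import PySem

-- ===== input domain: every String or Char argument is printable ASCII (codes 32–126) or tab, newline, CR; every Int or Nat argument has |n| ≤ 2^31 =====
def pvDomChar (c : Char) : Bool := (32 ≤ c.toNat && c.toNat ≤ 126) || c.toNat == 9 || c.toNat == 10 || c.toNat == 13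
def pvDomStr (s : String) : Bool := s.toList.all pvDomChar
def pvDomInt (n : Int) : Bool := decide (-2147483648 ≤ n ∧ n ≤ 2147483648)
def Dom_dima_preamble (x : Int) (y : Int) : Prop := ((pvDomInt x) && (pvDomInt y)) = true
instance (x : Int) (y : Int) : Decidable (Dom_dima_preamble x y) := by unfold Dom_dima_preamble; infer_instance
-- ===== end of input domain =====

-- B replaces A's bit-vector chain recurrences entirely: per 4-bit group it reads all four output bits
-- at once as the carries of the integer addition a + b + 1 of the two nibbles ((s ^ a ^ b) >> 1), a
-- different (arithmetic, chain-free) algorithm of similar cost.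


-- ===== PORT A =====
-- int2vec = lambda x : [(x >> i) & 0x1 for i in range(16)]   (i ≥ 0, so `x >> i` is `x >>> i.toNat`, exact)
def pvInt2vec (z : Int) : List Int :=
  (PySem.List.pyRange 0 16 1).map (fun i => PySem.Int.band (z >>> i.toNat) 1)

-- vec2int = lambda v : sum([x*(2**i) for i,x in enumerate(v)])   (i ≥ 0, so `2**i` is `2 ^ i.toNat`, exact)
def pvVec2int (v : List Int) : Int :=
  ((PySem.List.enumerate v).map (fun p => p.2 * 2 ^ p.1.toNat)).sum

-- the body of A's inner `for j in range(i,16,4)` loop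
def pvLoopBody (xv yv : List Int) (st : List Int × List Int) (j : Int) : List Int × List Int :=
  let c1 := PySem.List.pySetD st.1 j (PySem.Int.band (PySem.List.pyGetD st.1 (j - 1) 0)
    (PySem.Int.bxor (PySem.List.pyGetD xv j 0) (PySem.List.pyGetD yv j 0)))
  let c0 := PySem.List.pySetD st.2 j (PySem.Int.bor
    (PySem.Int.band (PySem.List.pyGetD xv j 0) (PySem.List.pyGetD yv j 0))
    (PySem.Int.band (PySem.List.pyGetD st.2 (j - 1) 0)
      (PySem.Int.bxor (PySem.List.pyGetD xv j 0) (PySem.List.pyGetD yv j 0))))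
  (c1, c0)

def dima_preamble (x : Int) (y : Int) : Int :=
  let cout1 := pvInt2vec (PySem.Int.bxor x y)
  let cout0 := pvInt2vec (PySem.Int.band x y)
  let xv := pvInt2vec x
  let yv := pvInt2vec y
  let st := (PySem.List.pyRange 1 4 1).foldl
    (fun st i => (PySem.List.pyRange i 16 4).foldl (pvLoopBody xv yv) st) (cout1, cout0)
  let cout1i := pvVec2int st.1
  let cout0i := pvVec2int st.2
  let _xi := pvVec2int xv
  let _yi := pvVec2int yv
  PySem.Int.bor cout0i cout1i

-- ===== PORT B =====
-- for base in (0, 4, 8, 12): a = (x >> base) & 15; b = (y >> base) & 15;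
--   res += ((((a + b + 1) ^ a ^ b) >> 1) & 15) * 2 ** base
def dima_preamble_alt (x : Int) (y : Int) : Int :=
  [(0 : Int), 4, 8, 12].foldl (fun res base =>
    let a := PySem.Int.band (x >>> base.toNat) 15
    let b := PySem.Int.band (y >>> base.toNat) 15
    res + PySem.Int.band ((PySem.Int.bxor (PySem.Int.bxor (a + b + 1) a) b) >>> (1 : Nat)) 15 * 2 ^ base.toNat) 0

-- ===== PRECONDITION & SPEC =====
def Spec_dima_preamble (x : Int) (y : Int) (out : Int) : Prop := out = dima_preamble_alt x y
instance (x : Int) (y : Int) (out : Int) : Decidable (Spec_dima_preamble x y out) := by unfold Spec_dima_preamble; infer_instance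

-- ===== CLAIM (what is proved, stated in full; the proofs are below) =====
def Claim_equal_dima_preamble : Prop := ∀ (x : Int) (y : Int), Dom_dima_preamble x y → Spec_dima_preamble x y (dima_preamble x y)

-- ===== LEMMAS AND PROOFS =====

def pvB (z : Int) (j : Nat) : Int := PySem.Int.band (z >>> j) 1

lemma pvNS (n : Nat) : ¬ (0 ≤ Int.negSucc n) := by simp [Int.negSucc_eq]; omega
lemma pvNS' (n : Nat) : (-Int.negSucc n - 1) = (n : Int) := by rw [Int.negSucc_eq]; ring

lemma bxor_nn (m n : Nat) : PySem.Int.bxor (m : Int) (n : Int) = ((m ^^^ n : Nat) : Int) := by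
  simp only [PySem.Int.bxor]
  rw [if_pos (Int.natCast_nonneg m), if_pos (Int.natCast_nonneg n)]
  simp
lemma bxor_ns (m n : Nat) : PySem.Int.bxor (m : Int) (Int.negSucc n) = Int.negSucc (m ^^^ n) := by
  simp only [PySem.Int.bxor]
  rw [if_pos (Int.natCast_nonneg m), if_neg (pvNS n), pvNS']
  simp [Int.negSucc_eq]; ring
lemma bxor_sn (m n : Nat) : PySem.Int.bxor (Int.negSucc m) (n : Int) = Int.negSucc (m ^^^ n) := by
  simp only [PySem.Int.bxor]
  rw [if_neg (pvNS m), if_pos (Int.natCast_nonneg n), pvNS']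
  simp [Int.negSucc_eq]; ring
lemma bxor_ss (m n : Nat) : PySem.Int.bxor (Int.negSucc m) (Int.negSucc n) = ((m ^^^ n : Nat) : Int) := by
  simp only [PySem.Int.bxor]
  rw [if_neg (pvNS m), if_neg (pvNS n), pvNS', pvNS']
  simp
lemma band_nn (m n : Nat) : PySem.Int.band (m : Int) (n : Int) = ((m &&& n : Nat) : Int) := by
  simp only [PySem.Int.band]
  rw [if_pos (Int.natCast_nonneg m), if_pos (Int.natCast_nonneg n)]
  simp
lemma band_ns (m n : Nat) : PySem.Int.band (m : Int) (Int.negSucc n) = ((m - (m &&& n) : Nat) : Int) := by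
  simp only [PySem.Int.band]
  rw [if_pos (Int.natCast_nonneg m), if_neg (pvNS n), pvNS']
  simp
lemma band_sn (m n : Nat) : PySem.Int.band (Int.negSucc m) (n : Int) = ((n - (n &&& m) : Nat) : Int) := by
  simp only [PySem.Int.band]
  rw [if_neg (pvNS m), if_pos (Int.natCast_nonneg n), pvNS']
  simp
lemma band_ss (m n : Nat) : PySem.Int.band (Int.negSucc m) (Int.negSucc n) = Int.negSucc (m ||| n) := by
  simp only [PySem.Int.band]
  rw [if_neg (pvNS m), if_neg (pvNS n), pvNS', pvNS']
  simp [Int.negSucc_eq]; ring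

lemma pvHalfN (m : Nat) : ((m : Int)) / 2 = ((m / 2 : Nat) : Int) := by omega
lemma pvHalfS (m : Nat) : (Int.negSucc m) / 2 = Int.negSucc (m / 2) := by
  rw [Int.negSucc_eq, Int.negSucc_eq]; omega
lemma pvModN (k : Nat) : ((k : Int)) % 2 = ((k % 2 : Nat) : Int) := by omega
lemma pvModS (k : Nat) : (Int.negSucc k) % 2 = ((1 - k % 2 : Nat) : Int) := by
  rw [Int.negSucc_eq]; omega

lemma nx_mod (a b : Nat) : (a ^^^ b) % 2 = (a % 2) ^^^ (b % 2) := by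
  rw [← Nat.and_one_is_mod, ← Nat.and_one_is_mod, ← Nat.and_one_is_mod]
  apply Nat.eq_of_testBit_eq; intro i
  simp only [Nat.testBit_land, Nat.testBit_xor]
  cases h1 : a.testBit i <;> cases h2 : b.testBit i <;> simp
lemma na_mod (a b : Nat) : (a &&& b) % 2 = (a % 2) &&& (b % 2) := by
  rw [← Nat.and_one_is_mod, ← Nat.and_one_is_mod, ← Nat.and_one_is_mod]
  apply Nat.eq_of_testBit_eq; intro i
  simp only [Nat.testBit_land]
  cases h1 : a.testBit i <;> cases h2 : b.testBit i <;> simp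
lemma no_mod (a b : Nat) : (a ||| b) % 2 = (a % 2) ||| (b % 2) := by
  rw [← Nat.and_one_is_mod, ← Nat.and_one_is_mod, ← Nat.and_one_is_mod]
  apply Nat.eq_of_testBit_eq; intro i
  simp only [Nat.testBit_land, Nat.testBit_lor]
  cases h1 : a.testBit i <;> cases h2 : b.testBit i <;> simp
lemma nx_div (a b : Nat) : (a ^^^ b) / 2 = (a / 2) ^^^ (b / 2) := by
  simpa [Nat.shiftRight_one] using (Nat.shiftRight_xor_distrib (a := a) (b := b) (i := 1))
lemma na_div (a b : Nat) : (a &&& b) / 2 = (a / 2) &&& (b / 2) := by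
  simpa [Nat.shiftRight_one] using (Nat.shiftRight_and_distrib (a := a) (b := b) (i := 1))
lemma no_div (a b : Nat) : (a ||| b) / 2 = (a / 2) ||| (b / 2) := by
  simpa [Nat.shiftRight_one] using (Nat.shiftRight_or_distrib (a := a) (b := b) (i := 1))

lemma H_xor (u v : Int) : PySem.Int.bxor u v / 2 = PySem.Int.bxor (u / 2) (v / 2) := by
  rcases u with m | m <;> rcases v with n | n <;> (try simp only [Int.ofNat_eq_natCast])
  · rw [bxor_nn]; simp only [pvHalfN]; rw [bxor_nn, nx_div]
  · rw [bxor_ns]; simp only [pvHalfN, pvHalfS]; rw [bxor_ns, nx_div]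
  · rw [bxor_sn]; simp only [pvHalfN, pvHalfS]; rw [bxor_sn, nx_div]
  · rw [bxor_ss]; simp only [pvHalfN, pvHalfS]; rw [bxor_ss, nx_div]

lemma H_and (u v : Int) : PySem.Int.band u v / 2 = PySem.Int.band (u / 2) (v / 2) := by
  rcases u with m | m <;> rcases v with n | n <;> (try simp only [Int.ofNat_eq_natCast])
  · rw [band_nn]; simp only [pvHalfN]; rw [band_nn, na_div]
  · rw [band_ns]; simp only [pvHalfN, pvHalfS]; rw [band_ns]
    have hk : (m &&& n) ≤ m := Nat.and_le_left
    have hk2 : (m &&& n) % 2 ≤ m % 2 := by rw [na_mod]; exact Nat.and_le_left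
    have hd : (m &&& n) / 2 = m / 2 &&& n / 2 := na_div m n
    omega
  · rw [band_sn]; simp only [pvHalfN, pvHalfS]; rw [band_sn]
    have hk : (n &&& m) ≤ n := Nat.and_le_left
    have hk2 : (n &&& m) % 2 ≤ n % 2 := by rw [na_mod]; exact Nat.and_le_left
    have hd : (n &&& m) / 2 = n / 2 &&& m / 2 := na_div n m
    omega
  · rw [band_ss]; simp only [pvHalfS]; rw [band_ss, no_div]

lemma P_xor (u v : Int) : (PySem.Int.bxor u v) % 2 = PySem.Int.bxor (u % 2) (v % 2) := by
  rcases u with m | m <;> rcases v with n | n <;> (try simp only [Int.ofNat_eq_natCast])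
  · rw [bxor_nn]; simp only [pvModN]; rw [bxor_nn, nx_mod]
  · rw [bxor_ns]; simp only [pvModN, pvModS]
    rcases Nat.mod_two_eq_zero_or_one m with hm | hm <;>
      rcases Nat.mod_two_eq_zero_or_one n with hn | hn <;>
      rw [nx_mod, hm, hn] <;> decide
  · rw [bxor_sn]; simp only [pvModN, pvModS]
    rcases Nat.mod_two_eq_zero_or_one m with hm | hm <;>
      rcases Nat.mod_two_eq_zero_or_one n with hn | hn <;>
      rw [nx_mod, hm, hn] <;> decide
  · rw [bxor_ss]; simp only [pvModN, pvModS]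
    rcases Nat.mod_two_eq_zero_or_one m with hm | hm <;>
      rcases Nat.mod_two_eq_zero_or_one n with hn | hn <;>
      rw [nx_mod, hm, hn] <;> decide

lemma P_and (u v : Int) : (PySem.Int.band u v) % 2 = PySem.Int.band (u % 2) (v % 2) := by
  rcases u with m | m <;> rcases v with n | n <;> (try simp only [Int.ofNat_eq_natCast])
  · rw [band_nn]; simp only [pvModN]; rw [band_nn, na_mod]
  · rw [band_ns]; simp only [pvModN, pvModS]
    have h : (m - (m &&& n)) % 2 = m % 2 - ((m % 2) &&& (n % 2)) := by
      have hk : (m &&& n) ≤ m := Nat.and_le_left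
      have hk2 : (m &&& n) % 2 ≤ m % 2 := by rw [na_mod]; exact Nat.and_le_left
      have hm := na_mod m n
      omega
    rw [h]
    rcases Nat.mod_two_eq_zero_or_one m with hm | hm <;>
      rcases Nat.mod_two_eq_zero_or_one n with hn | hn <;>
      rw [hm, hn] <;> decide
  · rw [band_sn]; simp only [pvModN, pvModS]
    have h : (n - (n &&& m)) % 2 = n % 2 - ((n % 2) &&& (m % 2)) := by
      have hk : (n &&& m) ≤ n := Nat.and_le_left
      have hk2 : (n &&& m) % 2 ≤ n % 2 := by rw [na_mod]; exact Nat.and_le_left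
      have hm := na_mod n m
      omega
    rw [h]
    rcases Nat.mod_two_eq_zero_or_one m with hm | hm <;>
      rcases Nat.mod_two_eq_zero_or_one n with hn | hn <;>
      rw [hm, hn] <;> decide
  · rw [band_ss]; simp only [pvModS]
    rcases Nat.mod_two_eq_zero_or_one m with hm | hm <;>
      rcases Nat.mod_two_eq_zero_or_one n with hn | hn <;>
      rw [no_mod, hm, hn] <;> decide

lemma pvB0 (z : Int) : pvB z 0 = z % 2 := by
  show PySem.Int.band (z >>> (0:Nat)) 1 = z % 2
  rw [PySem.Int.band_one, PySem.Int.mod_eq_emod_of_pos (by norm_num), Int.shiftRight_eq_div_pow]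
  norm_num

lemma pvB_succ (z : Int) (j : Nat) : pvB z (j + 1) = pvB (z / 2) j := by
  show PySem.Int.band (z >>> (j+1 : Nat)) 1 = PySem.Int.band ((z / 2) >>> j) 1
  rw [Int.shiftRight_eq_div_pow, Int.shiftRight_eq_div_pow]
  congr 1
  rw [Int.ediv_ediv_of_nonneg (by norm_num)]
  congr 1
  push_cast
  ring

lemma X1 (j : Nat) (u v : Int) : pvB (PySem.Int.bxor u v) j = PySem.Int.bxor (pvB u j) (pvB v j) := by
  induction j generalizing u v with
  | zero => rw [pvB0, pvB0, pvB0, P_xor]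
  | succ j ih => rw [pvB_succ, pvB_succ, pvB_succ, H_xor, ih]

lemma X2 (j : Nat) (u v : Int) : pvB (PySem.Int.band u v) j = PySem.Int.band (pvB u j) (pvB v j) := by
  induction j generalizing u v with
  | zero => rw [pvB0, pvB0, pvB0, P_and]
  | succ j ih => rw [pvB_succ, pvB_succ, pvB_succ, H_and, ih]

-- per-bit chain values: pvC*/pvD* name the entries A's loop leaves at bit base+t
def pvP (x y : Int) (j : Nat) : Int := PySem.Int.bxor (pvB x j) (pvB y j)
def pvG (x y : Int) (j : Nat) : Int := PySem.Int.band (pvB x j) (pvB y j)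
def pvC1 (x y : Int) (base : Nat) : Nat → Int
  | 0 => pvB (PySem.Int.bxor x y) base
  | t + 1 => PySem.Int.band (pvC1 x y base t) (pvP x y (base + (t + 1)))
def pvC0 (x y : Int) (base : Nat) : Nat → Int
  | 0 => pvB (PySem.Int.band x y) base
  | t + 1 => PySem.Int.bor (pvG x y (base + (t + 1)))
      (PySem.Int.band (pvC0 x y base t) (pvP x y (base + (t + 1))))
def pvD1 (x y : Int) (base : Nat) : Nat → Int
  | 0 => pvP x y base
  | t + 1 => PySem.Int.band (pvD1 x y base t) (pvP x y (base + (t + 1)))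
def pvD0 (x y : Int) (base : Nat) : Nat → Int
  | 0 => pvG x y base
  | t + 1 => PySem.Int.bor (pvG x y (base + (t + 1)))
      (PySem.Int.band (pvD0 x y base t) (pvP x y (base + (t + 1))))

lemma pvCD1 (x y : Int) (base t : Nat) : pvC1 x y base t = pvD1 x y base t := by
  induction t with
  | zero => exact X1 base x y
  | succ t ih => show PySem.Int.band _ _ = PySem.Int.band _ _; rw [ih]

lemma pvCD0 (x y : Int) (base t : Nat) : pvC0 x y base t = pvD0 x y base t := by
  induction t with
  | zero => exact X2 base x y
  | succ t ih => show PySem.Int.bor _ _ = PySem.Int.bor _ _; rw [ih]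

lemma pvSeed1 (x y : Int) (base : Nat) : pvB (PySem.Int.bxor x y) base = pvD1 x y base 0 :=
  X1 base x y
lemma pvSeed0 (x y : Int) (base : Nat) : pvB (PySem.Int.band x y) base = pvD0 x y base 0 :=
  X2 base x y

-- 0/1-valuedness
lemma pv01 (z : Int) (j : Nat) : pvB z j = 0 ∨ pvB z j = 1 := by
  show PySem.Int.band (z >>> j) 1 = 0 ∨ PySem.Int.band (z >>> j) 1 = 1
  rw [PySem.Int.band_one]; exact PySem.Int.mod_two_eq _
lemma bxor01 {u v : Int} (hu : u = 0 ∨ u = 1) (hv : v = 0 ∨ v = 1) :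
    PySem.Int.bxor u v = 0 ∨ PySem.Int.bxor u v = 1 := by
  rcases hu with h | h <;> rcases hv with h' | h' <;> subst h <;> subst h' <;> decide
lemma band01 {u v : Int} (hu : u = 0 ∨ u = 1) (hv : v = 0 ∨ v = 1) :
    PySem.Int.band u v = 0 ∨ PySem.Int.band u v = 1 := by
  rcases hu with h | h <;> rcases hv with h' | h' <;> subst h <;> subst h' <;> decide
lemma bor01 {u v : Int} (hu : u = 0 ∨ u = 1) (hv : v = 0 ∨ v = 1) :
    PySem.Int.bor u v = 0 ∨ PySem.Int.bor u v = 1 := by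
  rcases hu with h | h <;> rcases hv with h' | h' <;> subst h <;> subst h' <;> decide
lemma pvP01 (x y : Int) (j : Nat) : pvP x y j = 0 ∨ pvP x y j = 1 :=
  bxor01 (pv01 x j) (pv01 y j)
lemma pvG01 (x y : Int) (j : Nat) : pvG x y j = 0 ∨ pvG x y j = 1 :=
  band01 (pv01 x j) (pv01 y j)
lemma pvD101 (x y : Int) (base t : Nat) : pvD1 x y base t = 0 ∨ pvD1 x y base t = 1 := by
  induction t with
  | zero => exact pvP01 x y base
  | succ t ih => exact band01 ih (pvP01 x y (base + (t + 1)))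
lemma pvD001 (x y : Int) (base t : Nat) : pvD0 x y base t = 0 ∨ pvD0 x y base t = 1 := by
  induction t with
  | zero => exact pvG01 x y base
  | succ t ih => exact bor01 (pvG01 x y (base + (t + 1))) (band01 ih (pvP01 x y (base + (t + 1))))

-- bitwise-or of two bit-sums, one binary digit at a time
lemma natBorStep (un vn an bn : Nat) (hu : un ≤ 1) (hv : vn ≤ 1) :
    (un + 2 * an) ||| (vn + 2 * bn) = (un ||| vn) + 2 * (an ||| bn) := by
  have huv : un ||| vn ≤ 1 := by interval_cases un <;> interval_cases vn <;> decide
  apply Nat.eq_of_testBit_eq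
  intro i
  cases i with
  | zero =>
    rw [Nat.testBit_lor]
    simp only [Nat.testBit_zero]
    have e1 : (un + 2 * an) % 2 = un := by omega
    have e2 : (vn + 2 * bn) % 2 = vn := by omega
    have e3 : ((un ||| vn) + 2 * (an ||| bn)) % 2 = un ||| vn := by omega
    rw [e1, e2, e3]
    interval_cases un <;> interval_cases vn <;> simp
  | succ i =>
    rw [← Nat.testBit_div_two, ← Nat.testBit_div_two, no_div]
    have e1 : (un + 2 * an) / 2 = an := by omega
    have e2 : (vn + 2 * bn) / 2 = bn := by omega
    have e3 : ((un ||| vn) + 2 * (an ||| bn)) / 2 = an ||| bn := by omega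
    rw [e1, e2, e3]

lemma pvBorStep (u v a b : Int) (hu : u = 0 ∨ u = 1) (hv : v = 0 ∨ v = 1)
    (ha : 0 ≤ a) (hb : 0 ≤ b) :
    PySem.Int.bor (u + 2 * a) (v + 2 * b) = PySem.Int.bor u v + 2 * PySem.Int.bor a b := by
  have h1 : 0 ≤ u + 2 * a := by omega
  have h2 : 0 ≤ v + 2 * b := by omega
  have hu' : 0 ≤ u := by omega
  have hv' : 0 ≤ v := by omega
  rw [PySem.Int.bor_of_nonneg h1 h2, PySem.Int.bor_of_nonneg hu' hv', PySem.Int.bor_of_nonneg ha hb]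
  have e1 : (u + 2 * a).toNat = u.toNat + 2 * a.toNat := by omega
  have e2 : (v + 2 * b).toNat = v.toNat + 2 * b.toNat := by omega
  rw [e1, e2, natBorStep _ _ _ _ (by omega) (by omega)]
  push_cast
  ring


set_option maxHeartbeats 1000000 in
lemma pvKey (u0 u1 u2 u3 u4 u5 u6 u7 u8 u9 u10 u11 u12 u13 u14 u15 v0 v1 v2 v3 v4 v5 v6 v7 v8 v9 v10 v11 v12 v13 v14 v15 : Int)
    (hu0 : u0 = 0 ∨ u0 = 1) (hv0 : v0 = 0 ∨ v0 = 1)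
    (hu1 : u1 = 0 ∨ u1 = 1) (hv1 : v1 = 0 ∨ v1 = 1)
    (hu2 : u2 = 0 ∨ u2 = 1) (hv2 : v2 = 0 ∨ v2 = 1)
    (hu3 : u3 = 0 ∨ u3 = 1) (hv3 : v3 = 0 ∨ v3 = 1)
    (hu4 : u4 = 0 ∨ u4 = 1) (hv4 : v4 = 0 ∨ v4 = 1)
    (hu5 : u5 = 0 ∨ u5 = 1) (hv5 : v5 = 0 ∨ v5 = 1)
    (hu6 : u6 = 0 ∨ u6 = 1) (hv6 : v6 = 0 ∨ v6 = 1)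
    (hu7 : u7 = 0 ∨ u7 = 1) (hv7 : v7 = 0 ∨ v7 = 1)
    (hu8 : u8 = 0 ∨ u8 = 1) (hv8 : v8 = 0 ∨ v8 = 1)
    (hu9 : u9 = 0 ∨ u9 = 1) (hv9 : v9 = 0 ∨ v9 = 1)
    (hu10 : u10 = 0 ∨ u10 = 1) (hv10 : v10 = 0 ∨ v10 = 1)
    (hu11 : u11 = 0 ∨ u11 = 1) (hv11 : v11 = 0 ∨ v11 = 1)
    (hu12 : u12 = 0 ∨ u12 = 1) (hv12 : v12 = 0 ∨ v12 = 1)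
    (hu13 : u13 = 0 ∨ u13 = 1) (hv13 : v13 = 0 ∨ v13 = 1)
    (hu14 : u14 = 0 ∨ u14 = 1) (hv14 : v14 = 0 ∨ v14 = 1)
    (hu15 : u15 = 0 ∨ u15 = 1) (hv15 : v15 = 0 ∨ v15 = 1) :
    PySem.Int.bor (u0 * 1 + u1 * 2 + u2 * 4 + u3 * 8 + u4 * 16 + u5 * 32 + u6 * 64 + u7 * 128 + u8 * 256 + u9 * 512 + u10 * 1024 + u11 * 2048 + u12 * 4096 + u13 * 8192 + u14 * 16384 + u15 * 32768)
      (v0 * 1 + v1 * 2 + v2 * 4 + v3 * 8 + v4 * 16 + v5 * 32 + v6 * 64 + v7 * 128 + v8 * 256 + v9 * 512 + v10 * 1024 + v11 * 2048 + v12 * 4096 + v13 * 8192 + v14 * 16384 + v15 * 32768) =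
    PySem.Int.bor u0 v0 * 1 + PySem.Int.bor u1 v1 * 2 + PySem.Int.bor u2 v2 * 4 + PySem.Int.bor u3 v3 * 8 + PySem.Int.bor u4 v4 * 16 + PySem.Int.bor u5 v5 * 32 + PySem.Int.bor u6 v6 * 64 + PySem.Int.bor u7 v7 * 128 + PySem.Int.bor u8 v8 * 256 + PySem.Int.bor u9 v9 * 512 + PySem.Int.bor u10 v10 * 1024 + PySem.Int.bor u11 v11 * 2048 + PySem.Int.bor u12 v12 * 4096 + PySem.Int.bor u13 v13 * 8192 + PySem.Int.bor u14 v14 * 16384 + PySem.Int.bor u15 v15 * 32768 := by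
  rw [show u0 * 1 + u1 * 2 + u2 * 4 + u3 * 8 + u4 * 16 + u5 * 32 + u6 * 64 + u7 * 128 + u8 * 256 + u9 * 512 + u10 * 1024 + u11 * 2048 + u12 * 4096 + u13 * 8192 + u14 * 16384 + u15 * 32768 = u0 + 2 * (u1 + 2 * (u2 + 2 * (u3 + 2 * (u4 + 2 * (u5 + 2 * (u6 + 2 * (u7 + 2 * (u8 + 2 * (u9 + 2 * (u10 + 2 * (u11 + 2 * (u12 + 2 * (u13 + 2 * (u14 + 2 * (u15))))))))))))))) from by ring,
      show v0 * 1 + v1 * 2 + v2 * 4 + v3 * 8 + v4 * 16 + v5 * 32 + v6 * 64 + v7 * 128 + v8 * 256 + v9 * 512 + v10 * 1024 + v11 * 2048 + v12 * 4096 + v13 * 8192 + v14 * 16384 + v15 * 32768 = v0 + 2 * (v1 + 2 * (v2 + 2 * (v3 + 2 * (v4 + 2 * (v5 + 2 * (v6 + 2 * (v7 + 2 * (v8 + 2 * (v9 + 2 * (v10 + 2 * (v11 + 2 * (v12 + 2 * (v13 + 2 * (v14 + 2 * (v15))))))))))))))) from by ring]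
  have bu0 : (0:Int) ≤ u0 := by rcases hu0 with h | h <;> simp [h]
  have bu1 : (0:Int) ≤ u1 := by rcases hu1 with h | h <;> simp [h]
  have bu2 : (0:Int) ≤ u2 := by rcases hu2 with h | h <;> simp [h]
  have bu3 : (0:Int) ≤ u3 := by rcases hu3 with h | h <;> simp [h]
  have bu4 : (0:Int) ≤ u4 := by rcases hu4 with h | h <;> simp [h]
  have bu5 : (0:Int) ≤ u5 := by rcases hu5 with h | h <;> simp [h]
  have bu6 : (0:Int) ≤ u6 := by rcases hu6 with h | h <;> simp [h]
  have bu7 : (0:Int) ≤ u7 := by rcases hu7 with h | h <;> simp [h]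
  have bu8 : (0:Int) ≤ u8 := by rcases hu8 with h | h <;> simp [h]
  have bu9 : (0:Int) ≤ u9 := by rcases hu9 with h | h <;> simp [h]
  have bu10 : (0:Int) ≤ u10 := by rcases hu10 with h | h <;> simp [h]
  have bu11 : (0:Int) ≤ u11 := by rcases hu11 with h | h <;> simp [h]
  have bu12 : (0:Int) ≤ u12 := by rcases hu12 with h | h <;> simp [h]
  have bu13 : (0:Int) ≤ u13 := by rcases hu13 with h | h <;> simp [h]
  have bu14 : (0:Int) ≤ u14 := by rcases hu14 with h | h <;> simp [h]
  have bu15 : (0:Int) ≤ u15 := by rcases hu15 with h | h <;> simp [h]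
  have hnu15 : (0:Int) ≤ u15 := bu15
  have hnu14 : (0:Int) ≤ u14 + 2 * (u15) := add_nonneg bu14 (mul_nonneg (by norm_num) hnu15)
  have hnu13 : (0:Int) ≤ u13 + 2 * (u14 + 2 * (u15)) := add_nonneg bu13 (mul_nonneg (by norm_num) hnu14)
  have hnu12 : (0:Int) ≤ u12 + 2 * (u13 + 2 * (u14 + 2 * (u15))) := add_nonneg bu12 (mul_nonneg (by norm_num) hnu13)
  have hnu11 : (0:Int) ≤ u11 + 2 * (u12 + 2 * (u13 + 2 * (u14 + 2 * (u15)))) := add_nonneg bu11 (mul_nonneg (by norm_num) hnu12)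
  have hnu10 : (0:Int) ≤ u10 + 2 * (u11 + 2 * (u12 + 2 * (u13 + 2 * (u14 + 2 * (u15))))) := add_nonneg bu10 (mul_nonneg (by norm_num) hnu11)
  have hnu9 : (0:Int) ≤ u9 + 2 * (u10 + 2 * (u11 + 2 * (u12 + 2 * (u13 + 2 * (u14 + 2 * (u15)))))) := add_nonneg bu9 (mul_nonneg (by norm_num) hnu10)
  have hnu8 : (0:Int) ≤ u8 + 2 * (u9 + 2 * (u10 + 2 * (u11 + 2 * (u12 + 2 * (u13 + 2 * (u14 + 2 * (u15))))))) := add_nonneg bu8 (mul_nonneg (by norm_num) hnu9)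
  have hnu7 : (0:Int) ≤ u7 + 2 * (u8 + 2 * (u9 + 2 * (u10 + 2 * (u11 + 2 * (u12 + 2 * (u13 + 2 * (u14 + 2 * (u15)))))))) := add_nonneg bu7 (mul_nonneg (by norm_num) hnu8)
  have hnu6 : (0:Int) ≤ u6 + 2 * (u7 + 2 * (u8 + 2 * (u9 + 2 * (u10 + 2 * (u11 + 2 * (u12 + 2 * (u13 + 2 * (u14 + 2 * (u15))))))))) := add_nonneg bu6 (mul_nonneg (by norm_num) hnu7)
  have hnu5 : (0:Int) ≤ u5 + 2 * (u6 + 2 * (u7 + 2 * (u8 + 2 * (u9 + 2 * (u10 + 2 * (u11 + 2 * (u12 + 2 * (u13 + 2 * (u14 + 2 * (u15)))))))))) := add_nonneg bu5 (mul_nonneg (by norm_num) hnu6)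
  have hnu4 : (0:Int) ≤ u4 + 2 * (u5 + 2 * (u6 + 2 * (u7 + 2 * (u8 + 2 * (u9 + 2 * (u10 + 2 * (u11 + 2 * (u12 + 2 * (u13 + 2 * (u14 + 2 * (u15))))))))))) := add_nonneg bu4 (mul_nonneg (by norm_num) hnu5)
  have hnu3 : (0:Int) ≤ u3 + 2 * (u4 + 2 * (u5 + 2 * (u6 + 2 * (u7 + 2 * (u8 + 2 * (u9 + 2 * (u10 + 2 * (u11 + 2 * (u12 + 2 * (u13 + 2 * (u14 + 2 * (u15)))))))))))) := add_nonneg bu3 (mul_nonneg (by norm_num) hnu4)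
  have hnu2 : (0:Int) ≤ u2 + 2 * (u3 + 2 * (u4 + 2 * (u5 + 2 * (u6 + 2 * (u7 + 2 * (u8 + 2 * (u9 + 2 * (u10 + 2 * (u11 + 2 * (u12 + 2 * (u13 + 2 * (u14 + 2 * (u15))))))))))))) := add_nonneg bu2 (mul_nonneg (by norm_num) hnu3)
  have hnu1 : (0:Int) ≤ u1 + 2 * (u2 + 2 * (u3 + 2 * (u4 + 2 * (u5 + 2 * (u6 + 2 * (u7 + 2 * (u8 + 2 * (u9 + 2 * (u10 + 2 * (u11 + 2 * (u12 + 2 * (u13 + 2 * (u14 + 2 * (u15)))))))))))))) := add_nonneg bu1 (mul_nonneg (by norm_num) hnu2)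
  have bv0 : (0:Int) ≤ v0 := by rcases hv0 with h | h <;> simp [h]
  have bv1 : (0:Int) ≤ v1 := by rcases hv1 with h | h <;> simp [h]
  have bv2 : (0:Int) ≤ v2 := by rcases hv2 with h | h <;> simp [h]
  have bv3 : (0:Int) ≤ v3 := by rcases hv3 with h | h <;> simp [h]
  have bv4 : (0:Int) ≤ v4 := by rcases hv4 with h | h <;> simp [h]
  have bv5 : (0:Int) ≤ v5 := by rcases hv5 with h | h <;> simp [h]
  have bv6 : (0:Int) ≤ v6 := by rcases hv6 with h | h <;> simp [h]
  have bv7 : (0:Int) ≤ v7 := by rcases hv7 with h | h <;> simp [h]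
  have bv8 : (0:Int) ≤ v8 := by rcases hv8 with h | h <;> simp [h]
  have bv9 : (0:Int) ≤ v9 := by rcases hv9 with h | h <;> simp [h]
  have bv10 : (0:Int) ≤ v10 := by rcases hv10 with h | h <;> simp [h]
  have bv11 : (0:Int) ≤ v11 := by rcases hv11 with h | h <;> simp [h]
  have bv12 : (0:Int) ≤ v12 := by rcases hv12 with h | h <;> simp [h]
  have bv13 : (0:Int) ≤ v13 := by rcases hv13 with h | h <;> simp [h]
  have bv14 : (0:Int) ≤ v14 := by rcases hv14 with h | h <;> simp [h]
  have bv15 : (0:Int) ≤ v15 := by rcases hv15 with h | h <;> simp [h]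
  have hnv15 : (0:Int) ≤ v15 := bv15
  have hnv14 : (0:Int) ≤ v14 + 2 * (v15) := add_nonneg bv14 (mul_nonneg (by norm_num) hnv15)
  have hnv13 : (0:Int) ≤ v13 + 2 * (v14 + 2 * (v15)) := add_nonneg bv13 (mul_nonneg (by norm_num) hnv14)
  have hnv12 : (0:Int) ≤ v12 + 2 * (v13 + 2 * (v14 + 2 * (v15))) := add_nonneg bv12 (mul_nonneg (by norm_num) hnv13)
  have hnv11 : (0:Int) ≤ v11 + 2 * (v12 + 2 * (v13 + 2 * (v14 + 2 * (v15)))) := add_nonneg bv11 (mul_nonneg (by norm_num) hnv12)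
  have hnv10 : (0:Int) ≤ v10 + 2 * (v11 + 2 * (v12 + 2 * (v13 + 2 * (v14 + 2 * (v15))))) := add_nonneg bv10 (mul_nonneg (by norm_num) hnv11)
  have hnv9 : (0:Int) ≤ v9 + 2 * (v10 + 2 * (v11 + 2 * (v12 + 2 * (v13 + 2 * (v14 + 2 * (v15)))))) := add_nonneg bv9 (mul_nonneg (by norm_num) hnv10)
  have hnv8 : (0:Int) ≤ v8 + 2 * (v9 + 2 * (v10 + 2 * (v11 + 2 * (v12 + 2 * (v13 + 2 * (v14 + 2 * (v15))))))) := add_nonneg bv8 (mul_nonneg (by norm_num) hnv9)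
  have hnv7 : (0:Int) ≤ v7 + 2 * (v8 + 2 * (v9 + 2 * (v10 + 2 * (v11 + 2 * (v12 + 2 * (v13 + 2 * (v14 + 2 * (v15)))))))) := add_nonneg bv7 (mul_nonneg (by norm_num) hnv8)
  have hnv6 : (0:Int) ≤ v6 + 2 * (v7 + 2 * (v8 + 2 * (v9 + 2 * (v10 + 2 * (v11 + 2 * (v12 + 2 * (v13 + 2 * (v14 + 2 * (v15))))))))) := add_nonneg bv6 (mul_nonneg (by norm_num) hnv7)
  have hnv5 : (0:Int) ≤ v5 + 2 * (v6 + 2 * (v7 + 2 * (v8 + 2 * (v9 + 2 * (v10 + 2 * (v11 + 2 * (v12 + 2 * (v13 + 2 * (v14 + 2 * (v15)))))))))) := add_nonneg bv5 (mul_nonneg (by norm_num) hnv6)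
  have hnv4 : (0:Int) ≤ v4 + 2 * (v5 + 2 * (v6 + 2 * (v7 + 2 * (v8 + 2 * (v9 + 2 * (v10 + 2 * (v11 + 2 * (v12 + 2 * (v13 + 2 * (v14 + 2 * (v15))))))))))) := add_nonneg bv4 (mul_nonneg (by norm_num) hnv5)
  have hnv3 : (0:Int) ≤ v3 + 2 * (v4 + 2 * (v5 + 2 * (v6 + 2 * (v7 + 2 * (v8 + 2 * (v9 + 2 * (v10 + 2 * (v11 + 2 * (v12 + 2 * (v13 + 2 * (v14 + 2 * (v15)))))))))))) := add_nonneg bv3 (mul_nonneg (by norm_num) hnv4)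
  have hnv2 : (0:Int) ≤ v2 + 2 * (v3 + 2 * (v4 + 2 * (v5 + 2 * (v6 + 2 * (v7 + 2 * (v8 + 2 * (v9 + 2 * (v10 + 2 * (v11 + 2 * (v12 + 2 * (v13 + 2 * (v14 + 2 * (v15))))))))))))) := add_nonneg bv2 (mul_nonneg (by norm_num) hnv3)
  have hnv1 : (0:Int) ≤ v1 + 2 * (v2 + 2 * (v3 + 2 * (v4 + 2 * (v5 + 2 * (v6 + 2 * (v7 + 2 * (v8 + 2 * (v9 + 2 * (v10 + 2 * (v11 + 2 * (v12 + 2 * (v13 + 2 * (v14 + 2 * (v15)))))))))))))) := add_nonneg bv1 (mul_nonneg (by norm_num) hnv2)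
  rw [pvBorStep u0 v0 (u1 + 2 * (u2 + 2 * (u3 + 2 * (u4 + 2 * (u5 + 2 * (u6 + 2 * (u7 + 2 * (u8 + 2 * (u9 + 2 * (u10 + 2 * (u11 + 2 * (u12 + 2 * (u13 + 2 * (u14 + 2 * (u15))))))))))))))) (v1 + 2 * (v2 + 2 * (v3 + 2 * (v4 + 2 * (v5 + 2 * (v6 + 2 * (v7 + 2 * (v8 + 2 * (v9 + 2 * (v10 + 2 * (v11 + 2 * (v12 + 2 * (v13 + 2 * (v14 + 2 * (v15))))))))))))))) hu0 hv0 hnu1 hnv1]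
  rw [pvBorStep u1 v1 (u2 + 2 * (u3 + 2 * (u4 + 2 * (u5 + 2 * (u6 + 2 * (u7 + 2 * (u8 + 2 * (u9 + 2 * (u10 + 2 * (u11 + 2 * (u12 + 2 * (u13 + 2 * (u14 + 2 * (u15)))))))))))))) (v2 + 2 * (v3 + 2 * (v4 + 2 * (v5 + 2 * (v6 + 2 * (v7 + 2 * (v8 + 2 * (v9 + 2 * (v10 + 2 * (v11 + 2 * (v12 + 2 * (v13 + 2 * (v14 + 2 * (v15)))))))))))))) hu1 hv1 hnu2 hnv2]
  rw [pvBorStep u2 v2 (u3 + 2 * (u4 + 2 * (u5 + 2 * (u6 + 2 * (u7 + 2 * (u8 + 2 * (u9 + 2 * (u10 + 2 * (u11 + 2 * (u12 + 2 * (u13 + 2 * (u14 + 2 * (u15))))))))))))) (v3 + 2 * (v4 + 2 * (v5 + 2 * (v6 + 2 * (v7 + 2 * (v8 + 2 * (v9 + 2 * (v10 + 2 * (v11 + 2 * (v12 + 2 * (v13 + 2 * (v14 + 2 * (v15))))))))))))) hu2 hv2 hnu3 hnv3]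
  rw [pvBorStep u3 v3 (u4 + 2 * (u5 + 2 * (u6 + 2 * (u7 + 2 * (u8 + 2 * (u9 + 2 * (u10 + 2 * (u11 + 2 * (u12 + 2 * (u13 + 2 * (u14 + 2 * (u15)))))))))))) (v4 + 2 * (v5 + 2 * (v6 + 2 * (v7 + 2 * (v8 + 2 * (v9 + 2 * (v10 + 2 * (v11 + 2 * (v12 + 2 * (v13 + 2 * (v14 + 2 * (v15)))))))))))) hu3 hv3 hnu4 hnv4]
  rw [pvBorStep u4 v4 (u5 + 2 * (u6 + 2 * (u7 + 2 * (u8 + 2 * (u9 + 2 * (u10 + 2 * (u11 + 2 * (u12 + 2 * (u13 + 2 * (u14 + 2 * (u15))))))))))) (v5 + 2 * (v6 + 2 * (v7 + 2 * (v8 + 2 * (v9 + 2 * (v10 + 2 * (v11 + 2 * (v12 + 2 * (v13 + 2 * (v14 + 2 * (v15))))))))))) hu4 hv4 hnu5 hnv5]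
  rw [pvBorStep u5 v5 (u6 + 2 * (u7 + 2 * (u8 + 2 * (u9 + 2 * (u10 + 2 * (u11 + 2 * (u12 + 2 * (u13 + 2 * (u14 + 2 * (u15)))))))))) (v6 + 2 * (v7 + 2 * (v8 + 2 * (v9 + 2 * (v10 + 2 * (v11 + 2 * (v12 + 2 * (v13 + 2 * (v14 + 2 * (v15)))))))))) hu5 hv5 hnu6 hnv6]
  rw [pvBorStep u6 v6 (u7 + 2 * (u8 + 2 * (u9 + 2 * (u10 + 2 * (u11 + 2 * (u12 + 2 * (u13 + 2 * (u14 + 2 * (u15))))))))) (v7 + 2 * (v8 + 2 * (v9 + 2 * (v10 + 2 * (v11 + 2 * (v12 + 2 * (v13 + 2 * (v14 + 2 * (v15))))))))) hu6 hv6 hnu7 hnv7]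
  rw [pvBorStep u7 v7 (u8 + 2 * (u9 + 2 * (u10 + 2 * (u11 + 2 * (u12 + 2 * (u13 + 2 * (u14 + 2 * (u15)))))))) (v8 + 2 * (v9 + 2 * (v10 + 2 * (v11 + 2 * (v12 + 2 * (v13 + 2 * (v14 + 2 * (v15)))))))) hu7 hv7 hnu8 hnv8]
  rw [pvBorStep u8 v8 (u9 + 2 * (u10 + 2 * (u11 + 2 * (u12 + 2 * (u13 + 2 * (u14 + 2 * (u15))))))) (v9 + 2 * (v10 + 2 * (v11 + 2 * (v12 + 2 * (v13 + 2 * (v14 + 2 * (v15))))))) hu8 hv8 hnu9 hnv9]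
  rw [pvBorStep u9 v9 (u10 + 2 * (u11 + 2 * (u12 + 2 * (u13 + 2 * (u14 + 2 * (u15)))))) (v10 + 2 * (v11 + 2 * (v12 + 2 * (v13 + 2 * (v14 + 2 * (v15)))))) hu9 hv9 hnu10 hnv10]
  rw [pvBorStep u10 v10 (u11 + 2 * (u12 + 2 * (u13 + 2 * (u14 + 2 * (u15))))) (v11 + 2 * (v12 + 2 * (v13 + 2 * (v14 + 2 * (v15))))) hu10 hv10 hnu11 hnv11]
  rw [pvBorStep u11 v11 (u12 + 2 * (u13 + 2 * (u14 + 2 * (u15)))) (v12 + 2 * (v13 + 2 * (v14 + 2 * (v15)))) hu11 hv11 hnu12 hnv12]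
  rw [pvBorStep u12 v12 (u13 + 2 * (u14 + 2 * (u15))) (v13 + 2 * (v14 + 2 * (v15))) hu12 hv12 hnu13 hnv13]
  rw [pvBorStep u13 v13 (u14 + 2 * (u15)) (v14 + 2 * (v15)) hu13 hv13 hnu14 hnv14]
  rw [pvBorStep u14 v14 (u15) (v15) hu14 hv14 hnu15 hnv15]
  ring



lemma pvIVx (x : Int) : pvInt2vec x = [pvB x 0, pvB x 1, pvB x 2, pvB x 3, pvB x 4, pvB x 5, pvB x 6, pvB x 7, pvB x 8, pvB x 9, pvB x 10, pvB x 11, pvB x 12, pvB x 13, pvB x 14, pvB x 15] := by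
  unfold pvInt2vec
  rw [show PySem.List.pyRange 0 16 1 = [0, 1, 2, 3, 4, 5, 6, 7, 8, 9, 10, 11, 12, 13, 14, 15] from by decide]
  simp only [List.map_cons, List.map_nil, Int.shiftRight_natCast_right]
  rfl

lemma pvIV1 (x y : Int) : pvInt2vec (PySem.Int.bxor x y) = [pvB (PySem.Int.bxor x y) 0, pvB (PySem.Int.bxor x y) 1, pvB (PySem.Int.bxor x y) 2, pvB (PySem.Int.bxor x y) 3, pvB (PySem.Int.bxor x y) 4, pvB (PySem.Int.bxor x y) 5, pvB (PySem.Int.bxor x y) 6, pvB (PySem.Int.bxor x y) 7, pvB (PySem.Int.bxor x y) 8, pvB (PySem.Int.bxor x y) 9, pvB (PySem.Int.bxor x y) 10, pvB (PySem.Int.bxor x y) 11, pvB (PySem.Int.bxor x y) 12, pvB (PySem.Int.bxor x y) 13, pvB (PySem.Int.bxor x y) 14, pvB (PySem.Int.bxor x y) 15] := by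
  unfold pvInt2vec
  rw [show PySem.List.pyRange 0 16 1 = [0, 1, 2, 3, 4, 5, 6, 7, 8, 9, 10, 11, 12, 13, 14, 15] from by decide]
  simp only [List.map_cons, List.map_nil, Int.shiftRight_natCast_right]
  rfl

lemma pvIV0 (x y : Int) : pvInt2vec (PySem.Int.band x y) = [pvB (PySem.Int.band x y) 0, pvB (PySem.Int.band x y) 1, pvB (PySem.Int.band x y) 2, pvB (PySem.Int.band x y) 3, pvB (PySem.Int.band x y) 4, pvB (PySem.Int.band x y) 5, pvB (PySem.Int.band x y) 6, pvB (PySem.Int.band x y) 7, pvB (PySem.Int.band x y) 8, pvB (PySem.Int.band x y) 9, pvB (PySem.Int.band x y) 10, pvB (PySem.Int.band x y) 11, pvB (PySem.Int.band x y) 12, pvB (PySem.Int.band x y) 13, pvB (PySem.Int.band x y) 14, pvB (PySem.Int.band x y) 15] := by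
  unfold pvInt2vec
  rw [show PySem.List.pyRange 0 16 1 = [0, 1, 2, 3, 4, 5, 6, 7, 8, 9, 10, 11, 12, 13, 14, 15] from by decide]
  simp only [List.map_cons, List.map_nil, Int.shiftRight_natCast_right]
  rfl

lemma pvStA0 (x y : Int) : pvLoopBody [pvB x 0, pvB x 1, pvB x 2, pvB x 3, pvB x 4, pvB x 5, pvB x 6, pvB x 7, pvB x 8, pvB x 9, pvB x 10, pvB x 11, pvB x 12, pvB x 13, pvB x 14, pvB x 15] [pvB y 0, pvB y 1, pvB y 2, pvB y 3, pvB y 4, pvB y 5, pvB y 6, pvB y 7, pvB y 8, pvB y 9, pvB y 10, pvB y 11, pvB y 12, pvB y 13, pvB y 14, pvB y 15]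
    ([pvB (PySem.Int.bxor x y) 0, pvB (PySem.Int.bxor x y) 1, pvB (PySem.Int.bxor x y) 2, pvB (PySem.Int.bxor x y) 3, pvB (PySem.Int.bxor x y) 4, pvB (PySem.Int.bxor x y) 5, pvB (PySem.Int.bxor x y) 6, pvB (PySem.Int.bxor x y) 7, pvB (PySem.Int.bxor x y) 8, pvB (PySem.Int.bxor x y) 9, pvB (PySem.Int.bxor x y) 10, pvB (PySem.Int.bxor x y) 11, pvB (PySem.Int.bxor x y) 12, pvB (PySem.Int.bxor x y) 13, pvB (PySem.Int.bxor x y) 14, pvB (PySem.Int.bxor x y) 15],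
     [pvB (PySem.Int.band x y) 0, pvB (PySem.Int.band x y) 1, pvB (PySem.Int.band x y) 2, pvB (PySem.Int.band x y) 3, pvB (PySem.Int.band x y) 4, pvB (PySem.Int.band x y) 5, pvB (PySem.Int.band x y) 6, pvB (PySem.Int.band x y) 7, pvB (PySem.Int.band x y) 8, pvB (PySem.Int.band x y) 9, pvB (PySem.Int.band x y) 10, pvB (PySem.Int.band x y) 11, pvB (PySem.Int.band x y) 12, pvB (PySem.Int.band x y) 13, pvB (PySem.Int.band x y) 14, pvB (PySem.Int.band x y) 15]) 1 =
    ([pvB (PySem.Int.bxor x y) 0, pvC1 x y 0 1, pvB (PySem.Int.bxor x y) 2, pvB (PySem.Int.bxor x y) 3, pvB (PySem.Int.bxor x y) 4, pvB (PySem.Int.bxor x y) 5, pvB (PySem.Int.bxor x y) 6, pvB (PySem.Int.bxor x y) 7, pvB (PySem.Int.bxor x y) 8, pvB (PySem.Int.bxor x y) 9, pvB (PySem.Int.bxor x y) 10, pvB (PySem.Int.bxor x y) 11, pvB (PySem.Int.bxor x y) 12, pvB (PySem.Int.bxor x y) 13, pvB (PySem.Int.bxor x y) 14, pvB (PySem.Int.bxor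 x y) 15],
     [pvB (PySem.Int.band x y) 0, pvC0 x y 0 1, pvB (PySem.Int.band x y) 2, pvB (PySem.Int.band x y) 3, pvB (PySem.Int.band x y) 4, pvB (PySem.Int.band x y) 5, pvB (PySem.Int.band x y) 6, pvB (PySem.Int.band x y) 7, pvB (PySem.Int.band x y) 8, pvB (PySem.Int.band x y) 9, pvB (PySem.Int.band x y) 10, pvB (PySem.Int.band x y) 11, pvB (PySem.Int.band x y) 12, pvB (PySem.Int.band x y) 13, pvB (PySem.Int.band x y) 14, pvB (PySem.Int.band x y) 15]) := rfl

lemma pvStA1 (x y : Int) : pvLoopBody [pvB x 0, pvB x 1, pvB x 2, pvB x 3, pvB x 4, pvB x 5, pvB x 6, pvB x 7, pvB x 8, pvB x 9, pvB x 10, pvB x 11, pvB x 12, pvB x 13, pvB x 14, pvB x 15] [pvB y 0, pvB y 1, pvB y 2, pvB y 3, pvB y 4, pvB y 5, pvB y 6, pvB y 7, pvB y 8, pvB y 9, pvB y 10, pvB y 11, pvB y 12, pvB y 13, pvB y 14, pvB y 15]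
    ([pvB (PySem.Int.bxor x y) 0, pvC1 x y 0 1, pvB (PySem.Int.bxor x y) 2, pvB (PySem.Int.bxor x y) 3, pvB (PySem.Int.bxor x y) 4, pvB (PySem.Int.bxor x y) 5, pvB (PySem.Int.bxor x y) 6, pvB (PySem.Int.bxor x y) 7, pvB (PySem.Int.bxor x y) 8, pvB (PySem.Int.bxor x y) 9, pvB (PySem.Int.bxor x y) 10, pvB (PySem.Int.bxor x y) 11, pvB (PySem.Int.bxor x y) 12, pvB (PySem.Int.bxor x y) 13, pvB (PySem.Int.bxor x y) 14, pvB (PySem.Int.bxor x y) 15],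
     [pvB (PySem.Int.band x y) 0, pvC0 x y 0 1, pvB (PySem.Int.band x y) 2, pvB (PySem.Int.band x y) 3, pvB (PySem.Int.band x y) 4, pvB (PySem.Int.band x y) 5, pvB (PySem.Int.band x y) 6, pvB (PySem.Int.band x y) 7, pvB (PySem.Int.band x y) 8, pvB (PySem.Int.band x y) 9, pvB (PySem.Int.band x y) 10, pvB (PySem.Int.band x y) 11, pvB (PySem.Int.band x y) 12, pvB (PySem.Int.band x y) 13, pvB (PySem.Int.band x y) 14, pvB (PySem.Int.band x y) 15]) 5 =
    ([pvB (PySem.Int.bxor x y) 0, pvC1 x y 0 1, pvB (PySem.Int.bxor x y) 2, pvB (PySem.Int.bxor x y) 3, pvB (PySem.Int.bxor x y) 4, pvC1 x y 4 1, pvB (PySem.Int.bxor x y) 6, pvB (PySem.Int.bxor x y) 7, pvB (PySem.Int.bxor x y) 8, pvB (PySem.Int.bxor x y) 9, pvB (PySem.Int.bxor x y) 10, pvB (PySem.Int.bxor x y) 11, pvB (PySem.Int.bxor x y) 12, pvB (PySem.Int.bxor x y) 13, pvB (PySem.Int.bxor x y) 14, pvB (PySem.Int.bxor x y) 15],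
     [pvB (PySem.Int.band x y) 0, pvC0 x y 0 1, pvB (PySem.Int.band x y) 2, pvB (PySem.Int.band x y) 3, pvB (PySem.Int.band x y) 4, pvC0 x y 4 1, pvB (PySem.Int.band x y) 6, pvB (PySem.Int.band x y) 7, pvB (PySem.Int.band x y) 8, pvB (PySem.Int.band x y) 9, pvB (PySem.Int.band x y) 10, pvB (PySem.Int.band x y) 11, pvB (PySem.Int.band x y) 12, pvB (PySem.Int.band x y) 13, pvB (PySem.Int.band x y) 14, pvB (PySem.Int.band x y) 15]) := rfl

lemma pvStA2 (x y : Int) : pvLoopBody [pvB x 0, pvB x 1, pvB x 2, pvB x 3, pvB x 4, pvB x 5, pvB x 6, pvB x 7, pvB x 8, pvB x 9, pvB x 10, pvB x 11, pvB x 12, pvB x 13, pvB x 14, pvB x 15] [pvB y 0, pvB y 1, pvB y 2, pvB y 3, pvB y 4, pvB y 5, pvB y 6, pvB y 7, pvB y 8, pvB y 9, pvB y 10, pvB y 11, pvB y 12, pvB y 13, pvB y 14, pvB y 15]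
    ([pvB (PySem.Int.bxor x y) 0, pvC1 x y 0 1, pvB (PySem.Int.bxor x y) 2, pvB (PySem.Int.bxor x y) 3, pvB (PySem.Int.bxor x y) 4, pvC1 x y 4 1, pvB (PySem.Int.bxor x y) 6, pvB (PySem.Int.bxor x y) 7, pvB (PySem.Int.bxor x y) 8, pvB (PySem.Int.bxor x y) 9, pvB (PySem.Int.bxor x y) 10, pvB (PySem.Int.bxor x y) 11, pvB (PySem.Int.bxor x y) 12, pvB (PySem.Int.bxor x y) 13, pvB (PySem.Int.bxor x y) 14, pvB (PySem.Int.bxor x y) 15],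
     [pvB (PySem.Int.band x y) 0, pvC0 x y 0 1, pvB (PySem.Int.band x y) 2, pvB (PySem.Int.band x y) 3, pvB (PySem.Int.band x y) 4, pvC0 x y 4 1, pvB (PySem.Int.band x y) 6, pvB (PySem.Int.band x y) 7, pvB (PySem.Int.band x y) 8, pvB (PySem.Int.band x y) 9, pvB (PySem.Int.band x y) 10, pvB (PySem.Int.band x y) 11, pvB (PySem.Int.band x y) 12, pvB (PySem.Int.band x y) 13, pvB (PySem.Int.band x y) 14, pvB (PySem.Int.band x y) 15]) 9 =
    ([pvB (PySem.Int.bxor x y) 0, pvC1 x y 0 1, pvB (PySem.Int.bxor x y) 2, pvB (PySem.Int.bxor x y) 3, pvB (PySem.Int.bxor x y) 4, pvC1 x y 4 1, pvB (PySem.Int.bxor x y) 6, pvB (PySem.Int.bxor x y) 7, pvB (PySem.Int.bxor x y) 8, pvC1 x y 8 1, pvB (PySem.Int.bxor x y) 10, pvB (PySem.Int.bxor x y) 11, pvB (PySem.Int.bxor x y) 12, pvB (PySem.Int.bxor x y) 13, pvB (PySem.Int.bxor x y) 14, pvB (PySem.Int.bxor x y) 15],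
     [pvB (PySem.Int.band x y) 0, pvC0 x y 0 1, pvB (PySem.Int.band x y) 2, pvB (PySem.Int.band x y) 3, pvB (PySem.Int.band x y) 4, pvC0 x y 4 1, pvB (PySem.Int.band x y) 6, pvB (PySem.Int.band x y) 7, pvB (PySem.Int.band x y) 8, pvC0 x y 8 1, pvB (PySem.Int.band x y) 10, pvB (PySem.Int.band x y) 11, pvB (PySem.Int.band x y) 12, pvB (PySem.Int.band x y) 13, pvB (PySem.Int.band x y) 14, pvB (PySem.Int.band x y) 15]) := rfl

lemma pvStA3 (x y : Int) : pvLoopBody [pvB x 0, pvB x 1, pvB x 2, pvB x 3, pvB x 4, pvB x 5, pvB x 6, pvB x 7, pvB x 8, pvB x 9, pvB x 10, pvB x 11, pvB x 12, pvB x 13, pvB x 14, pvB x 15] [pvB y 0, pvB y 1, pvB y 2, pvB y 3, pvB y 4, pvB y 5, pvB y 6, pvB y 7, pvB y 8, pvB y 9, pvB y 10, pvB y 11, pvB y 12, pvB y 13, pvB y 14, pvB y 15]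
    ([pvB (PySem.Int.bxor x y) 0, pvC1 x y 0 1, pvB (PySem.Int.bxor x y) 2, pvB (PySem.Int.bxor x y) 3, pvB (PySem.Int.bxor x y) 4, pvC1 x y 4 1, pvB (PySem.Int.bxor x y) 6, pvB (PySem.Int.bxor x y) 7, pvB (PySem.Int.bxor x y) 8, pvC1 x y 8 1, pvB (PySem.Int.bxor x y) 10, pvB (PySem.Int.bxor x y) 11, pvB (PySem.Int.bxor x y) 12, pvB (PySem.Int.bxor x y) 13, pvB (PySem.Int.bxor x y) 14, pvB (PySem.Int.bxor x y) 15],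
     [pvB (PySem.Int.band x y) 0, pvC0 x y 0 1, pvB (PySem.Int.band x y) 2, pvB (PySem.Int.band x y) 3, pvB (PySem.Int.band x y) 4, pvC0 x y 4 1, pvB (PySem.Int.band x y) 6, pvB (PySem.Int.band x y) 7, pvB (PySem.Int.band x y) 8, pvC0 x y 8 1, pvB (PySem.Int.band x y) 10, pvB (PySem.Int.band x y) 11, pvB (PySem.Int.band x y) 12, pvB (PySem.Int.band x y) 13, pvB (PySem.Int.band x y) 14, pvB (PySem.Int.band x y) 15]) 13 =
    ([pvB (PySem.Int.bxor x y) 0, pvC1 x y 0 1, pvB (PySem.Int.bxor x y) 2, pvB (PySem.Int.bxor x y) 3, pvB (PySem.Int.bxor x y) 4, pvC1 x y 4 1, pvB (PySem.Int.bxor x y) 6, pvB (PySem.Int.bxor x y) 7, pvB (PySem.Int.bxor x y) 8, pvC1 x y 8 1, pvB (PySem.Int.bxor x y) 10, pvB (PySem.Int.bxor x y) 11, pvB (PySem.Int.bxor x y) 12, pvC1 x y 12 1, pvB (PySem.Int.bxor x y) 14, pvB (PySem.Int.bxor x y) 15],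
     [pvB (PySem.Int.band x y) 0, pvC0 x y 0 1, pvB (PySem.Int.band x y) 2, pvB (PySem.Int.band x y) 3, pvB (PySem.Int.band x y) 4, pvC0 x y 4 1, pvB (PySem.Int.band x y) 6, pvB (PySem.Int.band x y) 7, pvB (PySem.Int.band x y) 8, pvC0 x y 8 1, pvB (PySem.Int.band x y) 10, pvB (PySem.Int.band x y) 11, pvB (PySem.Int.band x y) 12, pvC0 x y 12 1, pvB (PySem.Int.band x y) 14, pvB (PySem.Int.band x y) 15]) := rfl

lemma pvStA4 (x y : Int) : pvLoopBody [pvB x 0, pvB x 1, pvB x 2, pvB x 3, pvB x 4, pvB x 5, pvB x 6, pvB x 7, pvB x 8, pvB x 9, pvB x 10, pvB x 11, pvB x 12, pvB x 13, pvB x 14, pvB x 15] [pvB y 0, pvB y 1, pvB y 2, pvB y 3, pvB y 4, pvB y 5, pvB y 6, pvB y 7, pvB y 8, pvB y 9, pvB y 10, pvB y 11, pvB y 12, pvB y 13, pvB y 14, pvB y 15]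
    ([pvB (PySem.Int.bxor x y) 0, pvC1 x y 0 1, pvB (PySem.Int.bxor x y) 2, pvB (PySem.Int.bxor x y) 3, pvB (PySem.Int.bxor x y) 4, pvC1 x y 4 1, pvB (PySem.Int.bxor x y) 6, pvB (PySem.Int.bxor x y) 7, pvB (PySem.Int.bxor x y) 8, pvC1 x y 8 1, pvB (PySem.Int.bxor x y) 10, pvB (PySem.Int.bxor x y) 11, pvB (PySem.Int.bxor x y) 12, pvC1 x y 12 1, pvB (PySem.Int.bxor x y) 14, pvB (PySem.Int.bxor x y) 15],
     [pvB (PySem.Int.band x y) 0, pvC0 x y 0 1, pvB (PySem.Int.band x y) 2, pvB (PySem.Int.band x y) 3, pvB (PySem.Int.band x y) 4, pvC0 x y 4 1, pvB (PySem.Int.band x y) 6, pvB (PySem.Int.band x y) 7, pvB (PySem.Int.band x y) 8, pvC0 x y 8 1, pvB (PySem.Int.band x y) 10, pvB (PySem.Int.band x y) 11, pvB (PySem.Int.band x y) 12, pvC0 x y 12 1, pvB (PySem.Int.band x y) 14, pvB (PySem.Int.band x y) 15]) 2 =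
    ([pvB (PySem.Int.bxor x y) 0, pvC1 x y 0 1, pvC1 x y 0 2, pvB (PySem.Int.bxor x y) 3, pvB (PySem.Int.bxor x y) 4, pvC1 x y 4 1, pvB (PySem.Int.bxor x y) 6, pvB (PySem.Int.bxor x y) 7, pvB (PySem.Int.bxor x y) 8, pvC1 x y 8 1, pvB (PySem.Int.bxor x y) 10, pvB (PySem.Int.bxor x y) 11, pvB (PySem.Int.bxor x y) 12, pvC1 x y 12 1, pvB (PySem.Int.bxor x y) 14, pvB (PySem.Int.bxor x y) 15],
     [pvB (PySem.Int.band x y) 0, pvC0 x y 0 1, pvC0 x y 0 2, pvB (PySem.Int.band x y) 3, pvB (PySem.Int.band x y) 4, pvC0 x y 4 1, pvB (PySem.Int.band x y) 6, pvB (PySem.Int.band x y) 7, pvB (PySem.Int.band x y) 8, pvC0 x y 8 1, pvB (PySem.Int.band x y) 10, pvB (PySem.Int.band x y) 11, pvB (PySem.Int.band x y) 12, pvC0 x y 12 1, pvB (PySem.Int.band x y) 14, pvB (PySem.Int.band x y) 15]) := rfl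

lemma pvStA5 (x y : Int) : pvLoopBody [pvB x 0, pvB x 1, pvB x 2, pvB x 3, pvB x 4, pvB x 5, pvB x 6, pvB x 7, pvB x 8, pvB x 9, pvB x 10, pvB x 11, pvB x 12, pvB x 13, pvB x 14, pvB x 15] [pvB y 0, pvB y 1, pvB y 2, pvB y 3, pvB y 4, pvB y 5, pvB y 6, pvB y 7, pvB y 8, pvB y 9, pvB y 10, pvB y 11, pvB y 12, pvB y 13, pvB y 14, pvB y 15]
    ([pvB (PySem.Int.bxor x y) 0, pvC1 x y 0 1, pvC1 x y 0 2, pvB (PySem.Int.bxor x y) 3, pvB (PySem.Int.bxor x y) 4, pvC1 x y 4 1, pvB (PySem.Int.bxor x y) 6, pvB (PySem.Int.bxor x y) 7, pvB (PySem.Int.bxor x y) 8, pvC1 x y 8 1, pvB (PySem.Int.bxor x y) 10, pvB (PySem.Int.bxor x y) 11, pvB (PySem.Int.bxor x y) 12, pvC1 x y 12 1, pvB (PySem.Int.bxor x y) 14, pvB (PySem.Int.bxor x y) 15],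
     [pvB (PySem.Int.band x y) 0, pvC0 x y 0 1, pvC0 x y 0 2, pvB (PySem.Int.band x y) 3, pvB (PySem.Int.band x y) 4, pvC0 x y 4 1, pvB (PySem.Int.band x y) 6, pvB (PySem.Int.band x y) 7, pvB (PySem.Int.band x y) 8, pvC0 x y 8 1, pvB (PySem.Int.band x y) 10, pvB (PySem.Int.band x y) 11, pvB (PySem.Int.band x y) 12, pvC0 x y 12 1, pvB (PySem.Int.band x y) 14, pvB (PySem.Int.band x y) 15]) 6 =
    ([pvB (PySem.Int.bxor x y) 0, pvC1 x y 0 1, pvC1 x y 0 2, pvB (PySem.Int.bxor x y) 3, pvB (PySem.Int.bxor x y) 4, pvC1 x y 4 1, pvC1 x y 4 2, pvB (PySem.Int.bxor x y) 7, pvB (PySem.Int.bxor x y) 8, pvC1 x y 8 1, pvB (PySem.Int.bxor x y) 10, pvB (PySem.Int.bxor x y) 11, pvB (PySem.Int.bxor x y) 12, pvC1 x y 12 1, pvB (PySem.Int.bxor x y) 14, pvB (PySem.Int.bxor x y) 15],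
     [pvB (PySem.Int.band x y) 0, pvC0 x y 0 1, pvC0 x y 0 2, pvB (PySem.Int.band x y) 3, pvB (PySem.Int.band x y) 4, pvC0 x y 4 1, pvC0 x y 4 2, pvB (PySem.Int.band x y) 7, pvB (PySem.Int.band x y) 8, pvC0 x y 8 1, pvB (PySem.Int.band x y) 10, pvB (PySem.Int.band x y) 11, pvB (PySem.Int.band x y) 12, pvC0 x y 12 1, pvB (PySem.Int.band x y) 14, pvB (PySem.Int.band x y) 15]) := rfl

lemma pvStA6 (x y : Int) : pvLoopBody [pvB x 0, pvB x 1, pvB x 2, pvB x 3, pvB x 4, pvB x 5, pvB x 6, pvB x 7, pvB x 8, pvB x 9, pvB x 10, pvB x 11, pvB x 12, pvB x 13, pvB x 14, pvB x 15] [pvB y 0, pvB y 1, pvB y 2, pvB y 3, pvB y 4, pvB y 5, pvB y 6, pvB y 7, pvB y 8, pvB y 9, pvB y 10, pvB y 11, pvB y 12, pvB y 13, pvB y 14, pvB y 15]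
    ([pvB (PySem.Int.bxor x y) 0, pvC1 x y 0 1, pvC1 x y 0 2, pvB (PySem.Int.bxor x y) 3, pvB (PySem.Int.bxor x y) 4, pvC1 x y 4 1, pvC1 x y 4 2, pvB (PySem.Int.bxor x y) 7, pvB (PySem.Int.bxor x y) 8, pvC1 x y 8 1, pvB (PySem.Int.bxor x y) 10, pvB (PySem.Int.bxor x y) 11, pvB (PySem.Int.bxor x y) 12, pvC1 x y 12 1, pvB (PySem.Int.bxor x y) 14, pvB (PySem.Int.bxor x y) 15],
     [pvB (PySem.Int.band x y) 0, pvC0 x y 0 1, pvC0 x y 0 2, pvB (PySem.Int.band x y) 3, pvB (PySem.Int.band x y) 4, pvC0 x y 4 1, pvC0 x y 4 2, pvB (PySem.Int.band x y) 7, pvB (PySem.Int.band x y) 8, pvC0 x y 8 1, pvB (PySem.Int.band x y) 10, pvB (PySem.Int.band x y) 11, pvB (PySem.Int.band x y) 12, pvC0 x y 12 1, pvB (PySem.Int.band x y) 14, pvB (PySem.Int.band x y) 15]) 10 =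
    ([pvB (PySem.Int.bxor x y) 0, pvC1 x y 0 1, pvC1 x y 0 2, pvB (PySem.Int.bxor x y) 3, pvB (PySem.Int.bxor x y) 4, pvC1 x y 4 1, pvC1 x y 4 2, pvB (PySem.Int.bxor x y) 7, pvB (PySem.Int.bxor x y) 8, pvC1 x y 8 1, pvC1 x y 8 2, pvB (PySem.Int.bxor x y) 11, pvB (PySem.Int.bxor x y) 12, pvC1 x y 12 1, pvB (PySem.Int.bxor x y) 14, pvB (PySem.Int.bxor x y) 15],
     [pvB (PySem.Int.band x y) 0, pvC0 x y 0 1, pvC0 x y 0 2, pvB (PySem.Int.band x y) 3, pvB (PySem.Int.band x y) 4, pvC0 x y 4 1, pvC0 x y 4 2, pvB (PySem.Int.band x y) 7, pvB (PySem.Int.band x y) 8, pvC0 x y 8 1, pvC0 x y 8 2, pvB (PySem.Int.band x y) 11, pvB (PySem.Int.band x y) 12, pvC0 x y 12 1, pvB (PySem.Int.band x y) 14, pvB (PySem.Int.band x y) 15]) := rfl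

lemma pvStA7 (x y : Int) : pvLoopBody [pvB x 0, pvB x 1, pvB x 2, pvB x 3, pvB x 4, pvB x 5, pvB x 6, pvB x 7, pvB x 8, pvB x 9, pvB x 10, pvB x 11, pvB x 12, pvB x 13, pvB x 14, pvB x 15] [pvB y 0, pvB y 1, pvB y 2, pvB y 3, pvB y 4, pvB y 5, pvB y 6, pvB y 7, pvB y 8, pvB y 9, pvB y 10, pvB y 11, pvB y 12, pvB y 13, pvB y 14, pvB y 15]
    ([pvB (PySem.Int.bxor x y) 0, pvC1 x y 0 1, pvC1 x y 0 2, pvB (PySem.Int.bxor x y) 3, pvB (PySem.Int.bxor x y) 4, pvC1 x y 4 1, pvC1 x y 4 2, pvB (PySem.Int.bxor x y) 7, pvB (PySem.Int.bxor x y) 8, pvC1 x y 8 1, pvC1 x y 8 2, pvB (PySem.Int.bxor x y) 11, pvB (PySem.Int.bxor x y) 12, pvC1 x y 12 1, pvB (PySem.Int.bxor x y) 14, pvB (PySem.Int.bxor x y) 15],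
     [pvB (PySem.Int.band x y) 0, pvC0 x y 0 1, pvC0 x y 0 2, pvB (PySem.Int.band x y) 3, pvB (PySem.Int.band x y) 4, pvC0 x y 4 1, pvC0 x y 4 2, pvB (PySem.Int.band x y) 7, pvB (PySem.Int.band x y) 8, pvC0 x y 8 1, pvC0 x y 8 2, pvB (PySem.Int.band x y) 11, pvB (PySem.Int.band x y) 12, pvC0 x y 12 1, pvB (PySem.Int.band x y) 14, pvB (PySem.Int.band x y) 15]) 14 =
    ([pvB (PySem.Int.bxor x y) 0, pvC1 x y 0 1, pvC1 x y 0 2, pvB (PySem.Int.bxor x y) 3, pvB (PySem.Int.bxor x y) 4, pvC1 x y 4 1, pvC1 x y 4 2, pvB (PySem.Int.bxor x y) 7, pvB (PySem.Int.bxor x y) 8, pvC1 x y 8 1, pvC1 x y 8 2, pvB (PySem.Int.bxor x y) 11, pvB (PySem.Int.bxor x y) 12, pvC1 x y 12 1, pvC1 x y 12 2, pvB (PySem.Int.bxor x y) 15],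
     [pvB (PySem.Int.band x y) 0, pvC0 x y 0 1, pvC0 x y 0 2, pvB (PySem.Int.band x y) 3, pvB (PySem.Int.band x y) 4, pvC0 x y 4 1, pvC0 x y 4 2, pvB (PySem.Int.band x y) 7, pvB (PySem.Int.band x y) 8, pvC0 x y 8 1, pvC0 x y 8 2, pvB (PySem.Int.band x y) 11, pvB (PySem.Int.band x y) 12, pvC0 x y 12 1, pvC0 x y 12 2, pvB (PySem.Int.band x y) 15]) := rfl

lemma pvStA8 (x y : Int) : pvLoopBody [pvB x 0, pvB x 1, pvB x 2, pvB x 3, pvB x 4, pvB x 5, pvB x 6, pvB x 7, pvB x 8, pvB x 9, pvB x 10, pvB x 11, pvB x 12, pvB x 13, pvB x 14, pvB x 15] [pvB y 0, pvB y 1, pvB y 2, pvB y 3, pvB y 4, pvB y 5, pvB y 6, pvB y 7, pvB y 8, pvB y 9, pvB y 10, pvB y 11, pvB y 12, pvB y 13, pvB y 14, pvB y 15]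
    ([pvB (PySem.Int.bxor x y) 0, pvC1 x y 0 1, pvC1 x y 0 2, pvB (PySem.Int.bxor x y) 3, pvB (PySem.Int.bxor x y) 4, pvC1 x y 4 1, pvC1 x y 4 2, pvB (PySem.Int.bxor x y) 7, pvB (PySem.Int.bxor x y) 8, pvC1 x y 8 1, pvC1 x y 8 2, pvB (PySem.Int.bxor x y) 11, pvB (PySem.Int.bxor x y) 12, pvC1 x y 12 1, pvC1 x y 12 2, pvB (PySem.Int.bxor x y) 15],
     [pvB (PySem.Int.band x y) 0, pvC0 x y 0 1, pvC0 x y 0 2, pvB (PySem.Int.band x y) 3, pvB (PySem.Int.band x y) 4, pvC0 x y 4 1, pvC0 x y 4 2, pvB (PySem.Int.band x y) 7, pvB (PySem.Int.band x y) 8, pvC0 x y 8 1, pvC0 x y 8 2, pvB (PySem.Int.band x y) 11, pvB (PySem.Int.band x y) 12, pvC0 x y 12 1, pvC0 x y 12 2, pvB (PySem.Int.band x y) 15]) 3 =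
    ([pvB (PySem.Int.bxor x y) 0, pvC1 x y 0 1, pvC1 x y 0 2, pvC1 x y 0 3, pvB (PySem.Int.bxor x y) 4, pvC1 x y 4 1, pvC1 x y 4 2, pvB (PySem.Int.bxor x y) 7, pvB (PySem.Int.bxor x y) 8, pvC1 x y 8 1, pvC1 x y 8 2, pvB (PySem.Int.bxor x y) 11, pvB (PySem.Int.bxor x y) 12, pvC1 x y 12 1, pvC1 x y 12 2, pvB (PySem.Int.bxor x y) 15],
     [pvB (PySem.Int.band x y) 0, pvC0 x y 0 1, pvC0 x y 0 2, pvC0 x y 0 3, pvB (PySem.Int.band x y) 4, pvC0 x y 4 1, pvC0 x y 4 2, pvB (PySem.Int.band x y) 7, pvB (PySem.Int.band x y) 8, pvC0 x y 8 1, pvC0 x y 8 2, pvB (PySem.Int.band x y) 11, pvB (PySem.Int.band x y) 12, pvC0 x y 12 1, pvC0 x y 12 2, pvB (PySem.Int.band x y) 15]) := rfl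

lemma pvStA9 (x y : Int) : pvLoopBody [pvB x 0, pvB x 1, pvB x 2, pvB x 3, pvB x 4, pvB x 5, pvB x 6, pvB x 7, pvB x 8, pvB x 9, pvB x 10, pvB x 11, pvB x 12, pvB x 13, pvB x 14, pvB x 15] [pvB y 0, pvB y 1, pvB y 2, pvB y 3, pvB y 4, pvB y 5, pvB y 6, pvB y 7, pvB y 8, pvB y 9, pvB y 10, pvB y 11, pvB y 12, pvB y 13, pvB y 14, pvB y 15]
    ([pvB (PySem.Int.bxor x y) 0, pvC1 x y 0 1, pvC1 x y 0 2, pvC1 x y 0 3, pvB (PySem.Int.bxor x y) 4, pvC1 x y 4 1, pvC1 x y 4 2, pvB (PySem.Int.bxor x y) 7, pvB (PySem.Int.bxor x y) 8, pvC1 x y 8 1, pvC1 x y 8 2, pvB (PySem.Int.bxor x y) 11, pvB (PySem.Int.bxor x y) 12, pvC1 x y 12 1, pvC1 x y 12 2, pvB (PySem.Int.bxor x y) 15],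
     [pvB (PySem.Int.band x y) 0, pvC0 x y 0 1, pvC0 x y 0 2, pvC0 x y 0 3, pvB (PySem.Int.band x y) 4, pvC0 x y 4 1, pvC0 x y 4 2, pvB (PySem.Int.band x y) 7, pvB (PySem.Int.band x y) 8, pvC0 x y 8 1, pvC0 x y 8 2, pvB (PySem.Int.band x y) 11, pvB (PySem.Int.band x y) 12, pvC0 x y 12 1, pvC0 x y 12 2, pvB (PySem.Int.band x y) 15]) 7 =
    ([pvB (PySem.Int.bxor x y) 0, pvC1 x y 0 1, pvC1 x y 0 2, pvC1 x y 0 3, pvB (PySem.Int.bxor x y) 4, pvC1 x y 4 1, pvC1 x y 4 2, pvC1 x y 4 3, pvB (PySem.Int.bxor x y) 8, pvC1 x y 8 1, pvC1 x y 8 2, pvB (PySem.Int.bxor x y) 11, pvB (PySem.Int.bxor x y) 12, pvC1 x y 12 1, pvC1 x y 12 2, pvB (PySem.Int.bxor x y) 15],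
     [pvB (PySem.Int.band x y) 0, pvC0 x y 0 1, pvC0 x y 0 2, pvC0 x y 0 3, pvB (PySem.Int.band x y) 4, pvC0 x y 4 1, pvC0 x y 4 2, pvC0 x y 4 3, pvB (PySem.Int.band x y) 8, pvC0 x y 8 1, pvC0 x y 8 2, pvB (PySem.Int.band x y) 11, pvB (PySem.Int.band x y) 12, pvC0 x y 12 1, pvC0 x y 12 2, pvB (PySem.Int.band x y) 15]) := rfl

lemma pvStA10 (x y : Int) : pvLoopBody [pvB x 0, pvB x 1, pvB x 2, pvB x 3, pvB x 4, pvB x 5, pvB x 6, pvB x 7, pvB x 8, pvB x 9, pvB x 10, pvB x 11, pvB x 12, pvB x 13, pvB x 14, pvB x 15] [pvB y 0, pvB y 1, pvB y 2, pvB y 3, pvB y 4, pvB y 5, pvB y 6, pvB y 7, pvB y 8, pvB y 9, pvB y 10, pvB y 11, pvB y 12, pvB y 13, pvB y 14, pvB y 15]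
    ([pvB (PySem.Int.bxor x y) 0, pvC1 x y 0 1, pvC1 x y 0 2, pvC1 x y 0 3, pvB (PySem.Int.bxor x y) 4, pvC1 x y 4 1, pvC1 x y 4 2, pvC1 x y 4 3, pvB (PySem.Int.bxor x y) 8, pvC1 x y 8 1, pvC1 x y 8 2, pvB (PySem.Int.bxor x y) 11, pvB (PySem.Int.bxor x y) 12, pvC1 x y 12 1, pvC1 x y 12 2, pvB (PySem.Int.bxor x y) 15],
     [pvB (PySem.Int.band x y) 0, pvC0 x y 0 1, pvC0 x y 0 2, pvC0 x y 0 3, pvB (PySem.Int.band x y) 4, pvC0 x y 4 1, pvC0 x y 4 2, pvC0 x y 4 3, pvB (PySem.Int.band x y) 8, pvC0 x y 8 1, pvC0 x y 8 2, pvB (PySem.Int.band x y) 11, pvB (PySem.Int.band x y) 12, pvC0 x y 12 1, pvC0 x y 12 2, pvB (PySem.Int.band x y) 15]) 11 =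
    ([pvB (PySem.Int.bxor x y) 0, pvC1 x y 0 1, pvC1 x y 0 2, pvC1 x y 0 3, pvB (PySem.Int.bxor x y) 4, pvC1 x y 4 1, pvC1 x y 4 2, pvC1 x y 4 3, pvB (PySem.Int.bxor x y) 8, pvC1 x y 8 1, pvC1 x y 8 2, pvC1 x y 8 3, pvB (PySem.Int.bxor x y) 12, pvC1 x y 12 1, pvC1 x y 12 2, pvB (PySem.Int.bxor x y) 15],
     [pvB (PySem.Int.band x y) 0, pvC0 x y 0 1, pvC0 x y 0 2, pvC0 x y 0 3, pvB (PySem.Int.band x y) 4, pvC0 x y 4 1, pvC0 x y 4 2, pvC0 x y 4 3, pvB (PySem.Int.band x y) 8, pvC0 x y 8 1, pvC0 x y 8 2, pvC0 x y 8 3, pvB (PySem.Int.band x y) 12, pvC0 x y 12 1, pvC0 x y 12 2, pvB (PySem.Int.band x y) 15]) := rfl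

lemma pvStA11 (x y : Int) : pvLoopBody [pvB x 0, pvB x 1, pvB x 2, pvB x 3, pvB x 4, pvB x 5, pvB x 6, pvB x 7, pvB x 8, pvB x 9, pvB x 10, pvB x 11, pvB x 12, pvB x 13, pvB x 14, pvB x 15] [pvB y 0, pvB y 1, pvB y 2, pvB y 3, pvB y 4, pvB y 5, pvB y 6, pvB y 7, pvB y 8, pvB y 9, pvB y 10, pvB y 11, pvB y 12, pvB y 13, pvB y 14, pvB y 15]
    ([pvB (PySem.Int.bxor x y) 0, pvC1 x y 0 1, pvC1 x y 0 2, pvC1 x y 0 3, pvB (PySem.Int.bxor x y) 4, pvC1 x y 4 1, pvC1 x y 4 2, pvC1 x y 4 3, pvB (PySem.Int.bxor x y) 8, pvC1 x y 8 1, pvC1 x y 8 2, pvC1 x y 8 3, pvB (PySem.Int.bxor x y) 12, pvC1 x y 12 1, pvC1 x y 12 2, pvB (PySem.Int.bxor x y) 15],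
     [pvB (PySem.Int.band x y) 0, pvC0 x y 0 1, pvC0 x y 0 2, pvC0 x y 0 3, pvB (PySem.Int.band x y) 4, pvC0 x y 4 1, pvC0 x y 4 2, pvC0 x y 4 3, pvB (PySem.Int.band x y) 8, pvC0 x y 8 1, pvC0 x y 8 2, pvC0 x y 8 3, pvB (PySem.Int.band x y) 12, pvC0 x y 12 1, pvC0 x y 12 2, pvB (PySem.Int.band x y) 15]) 15 =
    ([pvB (PySem.Int.bxor x y) 0, pvC1 x y 0 1, pvC1 x y 0 2, pvC1 x y 0 3, pvB (PySem.Int.bxor x y) 4, pvC1 x y 4 1, pvC1 x y 4 2, pvC1 x y 4 3, pvB (PySem.Int.bxor x y) 8, pvC1 x y 8 1, pvC1 x y 8 2, pvC1 x y 8 3, pvB (PySem.Int.bxor x y) 12, pvC1 x y 12 1, pvC1 x y 12 2, pvC1 x y 12 3],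
     [pvB (PySem.Int.band x y) 0, pvC0 x y 0 1, pvC0 x y 0 2, pvC0 x y 0 3, pvB (PySem.Int.band x y) 4, pvC0 x y 4 1, pvC0 x y 4 2, pvC0 x y 4 3, pvB (PySem.Int.band x y) 8, pvC0 x y 8 1, pvC0 x y 8 2, pvC0 x y 8 3, pvB (PySem.Int.band x y) 12, pvC0 x y 12 1, pvC0 x y 12 2, pvC0 x y 12 3]) := rfl

lemma pvV16 (w0 w1 w2 w3 w4 w5 w6 w7 w8 w9 w10 w11 w12 w13 w14 w15 : Int) : pvVec2int [w0, w1, w2, w3, w4, w5, w6, w7, w8, w9, w10, w11, w12, w13, w14, w15] = w0 * 1 + w1 * 2 + w2 * 4 + w3 * 8 + w4 * 16 + w5 * 32 + w6 * 64 + w7 * 128 + w8 * 256 + w9 * 512 + w10 * 1024 + w11 * 2048 + w12 * 4096 + w13 * 8192 + w14 * 16384 + w15 * 32768 := by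
  show List.sum _ = _
  norm_num [PySem.List.enumerate]
  simp only [show Int.toNat 2 = 2 from rfl, show Int.toNat 3 = 3 from rfl, show Int.toNat 4 = 4 from rfl, show Int.toNat 5 = 5 from rfl, show Int.toNat 6 = 6 from rfl, show Int.toNat 7 = 7 from rfl, show Int.toNat 8 = 8 from rfl, show Int.toNat 9 = 9 from rfl, show Int.toNat 10 = 10 from rfl, show Int.toNat 11 = 11 from rfl, show Int.toNat 12 = 12 from rfl, show Int.toNat 13 = 13 from rfl, show Int.toNat 14 = 14 from rfl, show Int.toNat 15 = 15 from rfl]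
  norm_num
  ring

-- ===== B-side: nibble closed form =====

lemma pvShiftShift (x : Int) (m n : Nat) : (x >>> m) >>> n = x >>> (m + n) := by
  simp only [Int.shiftRight_eq_div_pow]
  rw [Int.ediv_ediv_of_nonneg (by positivity)]
  push_cast
  rw [pow_add]

lemma pvBand15 (z : Int) : PySem.Int.band z 15 = z % 16 := by
  rcases z with m | m
  · rw [show (Int.ofNat m) = (m:Int) from rfl, show (15:Int) = ((15:Nat):Int) from rfl, band_nn]
    rw [Nat.and_two_pow_sub_one_eq_mod m 4]
    omega
  · rw [show (15:Int) = ((15:Nat):Int) from rfl, band_sn]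
    rw [Nat.and_comm, Nat.and_two_pow_sub_one_eq_mod m 4]
    rw [Int.negSucc_eq]
    have : m % 16 < 16 := Nat.mod_lt _ (by norm_num)
    omega

-- (x >> base) & 15 is the weighted sum of bits base .. base+3
lemma pvNibX (x : Int) (base : Nat) :
    PySem.Int.band (x >>> base) 15 = pvB x base + 2 * pvB x (base + 1) + 4 * pvB x (base + 2) + 8 * pvB x (base + 3) := by
  have hb : ∀ t : Nat, pvB x (base + t) = ((x >>> base) / 2 ^ t) % 2 := by
    intro t
    show PySem.Int.band (x >>> (base + t)) 1 = _
    rw [← pvShiftShift, PySem.Int.band_one, PySem.Int.mod_eq_emod_of_pos (by norm_num),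
        Int.shiftRight_eq_div_pow]
    push_cast
    rfl
  rw [pvBand15, show base = base + 0 from rfl, hb 0, hb 1, hb 2, hb 3]
  norm_num
  omega

-- carry chain of a 4-bit group = carries of nibble addition with carry-in 1, all 256 bit cases
set_option maxHeartbeats 2000000 in
lemma pvNibKey (a0 a1 a2 a3 b0 b1 b2 b3 : Int)
    (h0 : a0 = 0 ∨ a0 = 1) (h1 : a1 = 0 ∨ a1 = 1) (h2 : a2 = 0 ∨ a2 = 1) (h3 : a3 = 0 ∨ a3 = 1)
    (k0 : b0 = 0 ∨ b0 = 1) (k1 : b1 = 0 ∨ b1 = 1) (k2 : b2 = 0 ∨ b2 = 1) (k3 : b3 = 0 ∨ b3 = 1) :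
    PySem.Int.bor (PySem.Int.band a0 b0) (PySem.Int.bxor a0 b0) * 1
    + PySem.Int.bor (PySem.Int.bor (PySem.Int.band a1 b1) (PySem.Int.band (PySem.Int.band a0 b0) (PySem.Int.bxor a1 b1)))
        (PySem.Int.band (PySem.Int.bxor a0 b0) (PySem.Int.bxor a1 b1)) * 2
    + PySem.Int.bor (PySem.Int.bor (PySem.Int.band a2 b2) (PySem.Int.band (PySem.Int.bor (PySem.Int.band a1 b1) (PySem.Int.band (PySem.Int.band a0 b0) (PySem.Int.bxor a1 b1))) (PySem.Int.bxor a2 b2)))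
        (PySem.Int.band (PySem.Int.band (PySem.Int.bxor a0 b0) (PySem.Int.bxor a1 b1)) (PySem.Int.bxor a2 b2)) * 4
    + PySem.Int.bor (PySem.Int.bor (PySem.Int.band a3 b3) (PySem.Int.band (PySem.Int.bor (PySem.Int.band a2 b2) (PySem.Int.band (PySem.Int.bor (PySem.Int.band a1 b1) (PySem.Int.band (PySem.Int.band a0 b0) (PySem.Int.bxor a1 b1))) (PySem.Int.bxor a2 b2))) (PySem.Int.bxor a3 b3)))
        (PySem.Int.band (PySem.Int.band (PySem.Int.band (PySem.Int.bxor a0 b0) (PySem.Int.bxor a1 b1)) (PySem.Int.bxor a2 b2)) (PySem.Int.bxor a3 b3)) * 8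
    = PySem.Int.band ((PySem.Int.bxor (PySem.Int.bxor ((a0 + 2*a1 + 4*a2 + 8*a3) + (b0 + 2*b1 + 4*b2 + 8*b3) + 1) (a0 + 2*a1 + 4*a2 + 8*a3)) (b0 + 2*b1 + 4*b2 + 8*b3)) >>> (1 : Nat)) 15 := by
  rcases h0 with rfl | rfl <;> rcases h1 with rfl | rfl <;> rcases h2 with rfl | rfl <;> rcases h3 with rfl | rfl <;>
    rcases k0 with rfl | rfl <;> rcases k1 with rfl | rfl <;> rcases k2 with rfl | rfl <;> rcases k3 with rfl | rfl <;>
    decide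

-- one 4-bit group of A's result equals B's closed-form nibble value
lemma pvNibEq (x y : Int) (base : Nat) :
    PySem.Int.bor (pvD0 x y base 0) (pvD1 x y base 0) * 1
    + PySem.Int.bor (pvD0 x y base 1) (pvD1 x y base 1) * 2
    + PySem.Int.bor (pvD0 x y base 2) (pvD1 x y base 2) * 4
    + PySem.Int.bor (pvD0 x y base 3) (pvD1 x y base 3) * 8
    = PySem.Int.band ((PySem.Int.bxor (PySem.Int.bxor (PySem.Int.band (x >>> base) 15 + PySem.Int.band (y >>> base) 15 + 1) (PySem.Int.band (x >>> base) 15)) (PySem.Int.band (y >>> base) 15)) >>> (1 : Nat)) 15 := by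
  rw [pvNibX x base, pvNibX y base]
  exact pvNibKey (pvB x base) (pvB x (base + 1)) (pvB x (base + 2)) (pvB x (base + 3))
    (pvB y base) (pvB y (base + 1)) (pvB y (base + 2)) (pvB y (base + 3))
    (pv01 x base) (pv01 x (base + 1)) (pv01 x (base + 2)) (pv01 x (base + 3))
    (pv01 y base) (pv01 y (base + 1)) (pv01 y (base + 2)) (pv01 y (base + 3))

set_option maxHeartbeats 2000000 in
lemma pvMain (x y : Int) : dima_preamble x y = dima_preamble_alt x y := by
  unfold dima_preamble dima_preamble_alt
  rw [show PySem.List.pyRange 1 4 1 = [1, 2, 3] from by decide]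
  simp only [List.foldl_cons, List.foldl_nil]
  rw [show PySem.List.pyRange 1 16 4 = [1, 5, 9, 13] from by decide,
      show PySem.List.pyRange 2 16 4 = [2, 6, 10, 14] from by decide,
      show PySem.List.pyRange 3 16 4 = [3, 7, 11, 15] from by decide]
  simp only [List.foldl_cons, List.foldl_nil]
  rw [pvIV1 x y, pvIV0 x y, pvIVx x, pvIVx y]
  rw [pvStA0 x y, pvStA1 x y, pvStA2 x y, pvStA3 x y, pvStA4 x y, pvStA5 x y, pvStA6 x y, pvStA7 x y, pvStA8 x y, pvStA9 x y, pvStA10 x y, pvStA11 x y]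
  simp only []
  rw [pvV16, pvV16]
  simp only [pvCD1, pvCD0, pvSeed1, pvSeed0]
  rw [pvKey (pvD0 x y 0 0) (pvD0 x y 0 1) (pvD0 x y 0 2) (pvD0 x y 0 3) (pvD0 x y 4 0) (pvD0 x y 4 1) (pvD0 x y 4 2) (pvD0 x y 4 3) (pvD0 x y 8 0) (pvD0 x y 8 1) (pvD0 x y 8 2) (pvD0 x y 8 3) (pvD0 x y 12 0) (pvD0 x y 12 1) (pvD0 x y 12 2) (pvD0 x y 12 3)
      (pvD1 x y 0 0) (pvD1 x y 0 1) (pvD1 x y 0 2) (pvD1 x y 0 3) (pvD1 x y 4 0) (pvD1 x y 4 1) (pvD1 x y 4 2) (pvD1 x y 4 3) (pvD1 x y 8 0) (pvD1 x y 8 1) (pvD1 x y 8 2) (pvD1 x y 8 3) (pvD1 x y 12 0) (pvD1 x y 12 1) (pvD1 x y 12 2) (pvD1 x y 12 3)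
      (pvD001 x y 0 0) (pvD101 x y 0 0)
      (pvD001 x y 0 1) (pvD101 x y 0 1)
      (pvD001 x y 0 2) (pvD101 x y 0 2)
      (pvD001 x y 0 3) (pvD101 x y 0 3)
      (pvD001 x y 4 0) (pvD101 x y 4 0)
      (pvD001 x y 4 1) (pvD101 x y 4 1)
      (pvD001 x y 4 2) (pvD101 x y 4 2)
      (pvD001 x y 4 3) (pvD101 x y 4 3)
      (pvD001 x y 8 0) (pvD101 x y 8 0)
      (pvD001 x y 8 1) (pvD101 x y 8 1)
      (pvD001 x y 8 2) (pvD101 x y 8 2)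
      (pvD001 x y 8 3) (pvD101 x y 8 3)
      (pvD001 x y 12 0) (pvD101 x y 12 0)
      (pvD001 x y 12 1) (pvD101 x y 12 1)
      (pvD001 x y 12 2) (pvD101 x y 12 2)
      (pvD001 x y 12 3) (pvD101 x y 12 3)]
  simp only [show ((0:Int).toNat) = (0:Nat) from rfl, show ((4:Int).toNat) = (4:Nat) from rfl,
             show ((8:Int).toNat) = (8:Nat) from rfl, show ((12:Int).toNat) = (12:Nat) from rfl,
             Int.shiftRight_natCast_right]
  rw [← pvNibEq x y 0, ← pvNibEq x y 4, ← pvNibEq x y 8, ← pvNibEq x y 12]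
  ring

-- ===== VERDICT (by name: the statement is the Claim_ definition above) =====
theorem dima_preamble_spec : Claim_equal_dima_preamble := by
  intro x y _
  show dima_preamble x y = dima_preamble_alt x y
  exact pvMain x y
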